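-- pv_equiv track=rewrite | github.com/ook-lab/document-management-system | services/doc-processor/scripts/utils/collect_project_full.py | should_exclude_file
-- ===== SOURCE A (Python) =====
-- EXCLUDE_FILES = {
--     '.DS_Store', 'Thumbs.db', '*.pyc', '*.pyo', '*.so',
--     '*.dll', '*.exe', '*.bin', '*.pkl', '*.model',
--     '*.jpg', '*.jpeg', '*.png', '*.gif', '*.ico', '*.svg',
--     '*.pdf', '*.doc', '*.docx', '*.xls', '*.xlsx',
--     '*.zip', '*.tar', '*.gz', '*.rar', '*.7z',
--     '*.mp3', '*.mp4', '*.wav', '*.avi', '*.mov',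
--     '*.woff', '*.woff2', '*.ttf', '*.eot',
--     'PROJECT_SNAPSHOT_*.md', 'PROJECT_FULL_*.md', 'PIPELINE_*.md',
--     'collect_project_full.py', 'collect_pipeline.py'
-- }
--
-- def should_exclude_file(name):
--     if name in EXCLUDE_FILES:
--         return True
--     for pattern in EXCLUDE_FILES:
--         if '*' in pattern:
--             parts = pattern.split('*')
--             if len(parts) == 2:
--                 prefix, suffix = parts
--                 if name.startswith(prefix) and name.endswith(suffix):
--                     return True
--     return False
-- ===== SOURCE B (Python) =====
-- # B: instead of scanning every pattern per call, compute the part after the LAST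
-- # dot once (rfind + one slice) and look it up in a precomputed extension set;
-- # literal names in a set; the three PROJECT/PIPELINE rules collapse to one
-- # startswith over a prefix tuple guarded by ext == 'md'.
-- _EXACT = frozenset({'.DS_Store', 'Thumbs.db',
--                     'collect_project_full.py', 'collect_pipeline.py'})
--
-- _EXTS = frozenset({'pyc', 'pyo', 'so', 'dll', 'exe', 'bin', 'pkl', 'model',
--                    'jpg', 'jpeg', 'png', 'gif', 'ico', 'svg',
--                    'pdf', 'doc', 'docx', 'xls', 'xlsx',
--                    'zip', 'tar', 'gz', 'rar', '7z',
--                    'mp3', 'mp4', 'wav', 'avi', 'mov',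
--                    'woff', 'woff2', 'ttf', 'eot'})
--
-- _MD_PREFIXES = ('PROJECT_SNAPSHOT_', 'PROJECT_FULL_', 'PIPELINE_')
--
--
-- def should_exclude_file(name):
--     if name in _EXACT:
--         return True
--     dot = name.rfind('.')
--     if dot < 0:
--         return False
--     ext = name[dot + 1:]
--     if ext in _EXTS:
--         return True
--     return ext == 'md' and name.startswith(_MD_PREFIXES)
-- ===== Notes on version B (the rewrite author's own statement) =====
-- stated objective: simpler
-- what changed: B computes the substring after the last dot once (rfind plus one slice) and looks it up in a precomputed extension set, with literal names in their own set and the three markdown-report rules collapsed into a single prefix-tuple startswith test, instead of A's per-call loop that re-splits every pattern on the star character.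
import Mathlib
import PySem

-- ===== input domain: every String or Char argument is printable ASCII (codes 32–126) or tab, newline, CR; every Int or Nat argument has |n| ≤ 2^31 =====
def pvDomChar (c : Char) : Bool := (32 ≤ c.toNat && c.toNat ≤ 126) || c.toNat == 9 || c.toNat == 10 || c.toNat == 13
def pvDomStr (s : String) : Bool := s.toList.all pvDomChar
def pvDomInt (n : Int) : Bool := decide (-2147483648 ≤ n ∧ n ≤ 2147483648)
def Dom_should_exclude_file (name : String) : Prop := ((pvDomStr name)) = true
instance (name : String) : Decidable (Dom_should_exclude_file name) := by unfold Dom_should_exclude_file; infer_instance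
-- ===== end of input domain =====

set_option maxRecDepth 10000

-- B replaces A's per-call scan over every EXCLUDE_FILES pattern by computing the part
-- after the LAST dot once (rfind + one slice) and looking it up in a precomputed
-- extension set; objective: simpler per-call logic.

-- ===== PORT A =====
-- the module constant EXCLUDE_FILES (a Python set of distinct string literals, source order)
def pvExcludeFiles : PySem.Set String := PySem.Set.ofList
  [".DS_Store",
   "Thumbs.db",
   "*.pyc",
   "*.pyo",
   "*.so",
   "*.dll",
   "*.exe",
   "*.bin",
   "*.pkl",
   "*.model",
   "*.jpg",
   "*.jpeg",
   "*.png",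
   "*.gif",
   "*.ico",
   "*.svg",
   "*.pdf",
   "*.doc",
   "*.docx",
   "*.xls",
   "*.xlsx",
   "*.zip",
   "*.tar",
   "*.gz",
   "*.rar",
   "*.7z",
   "*.mp3",
   "*.mp4",
   "*.wav",
   "*.avi",
   "*.mov",
   "*.woff",
   "*.woff2",
   "*.ttf",
   "*.eot",
   "PROJECT_SNAPSHOT_*.md",
   "PROJECT_FULL_*.md",
   "PIPELINE_*.md",
   "collect_project_full.py",
   "collect_pipeline.py"]

-- the body of A's for-loop for one pattern ('return True' for a match)
def pvStepA (name pattern : String) : Bool :=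
  if PySem.Str.isIn "*" pattern then
    match PySem.Str.split? pattern "*" with
    | some [prefixp, suffixp] =>
        PySem.Str.startswith name prefixp && PySem.Str.endswith name suffixp
    | _ => false
  else false

def should_exclude_file (name : String) : Bool :=
  if name ∈ (pvExcludeFiles : List String) then true
  else
    -- 'for pattern in EXCLUDE_FILES: … return True' — loop with early exit = any
    (pvExcludeFiles : List String).any (pvStepA name)

-- ===== PORT B =====
-- Source B's module constants: literal names, bare extension set, md prefix tuple
def pvExact : PySem.Set String :=
  PySem.Set.ofList [".DS_Store", "Thumbs.db", "collect_project_full.py", "collect_pipeline.py"]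

def pvExts : PySem.Set String := PySem.Set.ofList
  ["pyc",
   "pyo",
   "so",
   "dll",
   "exe",
   "bin",
   "pkl",
   "model",
   "jpg",
   "jpeg",
   "png",
   "gif",
   "ico",
   "svg",
   "pdf",
   "doc",
   "docx",
   "xls",
   "xlsx",
   "zip",
   "tar",
   "gz",
   "rar",
   "7z",
   "mp3",
   "mp4",
   "wav",
   "avi",
   "mov",
   "woff",
   "woff2",
   "ttf",
   "eot"]

def pvMdPrefixes : List String := ["PROJECT_SNAPSHOT_", "PROJECT_FULL_", "PIPELINE_"]

def should_exclude_file_alt (name : String) : Bool :=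
  if name ∈ (pvExact : List String) then true
  else
    -- dot = name.rfind('.')
    let dot := PySem.Str.rfind name "."
    if dot < 0 then false
    else
      -- ext = name[dot + 1:]
      let ext := PySem.Str.slice name (some (dot + 1)) none
      if ext ∈ (pvExts : List String) then true
      else
        -- ext == 'md' and name.startswith(_MD_PREFIXES)
        ext == "md" && pvMdPrefixes.any (fun p => PySem.Str.startswith name p)

-- ===== PRECONDITION & SPEC =====
def Spec_should_exclude_file (name : String) (out : Bool) : Prop := out = should_exclude_file_alt name
instance (name : String) (out : Bool) : Decidable (Spec_should_exclude_file name out) := by unfold Spec_should_exclude_file; infer_instance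

-- ===== CLAIM (what is proved, stated in full; the proofs are below) =====
def Claim_equal_should_exclude_file : Prop := ∀ (name : String), Dom_should_exclude_file name → Spec_should_exclude_file name (should_exclude_file name)

-- ===== LEMMAS AND PROOFS =====

theorem pvExcludeFiles_eq : (pvExcludeFiles : List String) =
  [".DS_Store",
   "Thumbs.db",
   "*.pyc",
   "*.pyo",
   "*.so",
   "*.dll",
   "*.exe",
   "*.bin",
   "*.pkl",
   "*.model",
   "*.jpg",
   "*.jpeg",
   "*.png",
   "*.gif",
   "*.ico",
   "*.svg",
   "*.pdf",
   "*.doc",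
   "*.docx",
   "*.xls",
   "*.xlsx",
   "*.zip",
   "*.tar",
   "*.gz",
   "*.rar",
   "*.7z",
   "*.mp3",
   "*.mp4",
   "*.wav",
   "*.avi",
   "*.mov",
   "*.woff",
   "*.woff2",
   "*.ttf",
   "*.eot",
   "PROJECT_SNAPSHOT_*.md",
   "PROJECT_FULL_*.md",
   "PIPELINE_*.md",
   "collect_project_full.py",
   "collect_pipeline.py"] := by decide

theorem pvExts_eq : (pvExts : List String) =
  ["pyc",
   "pyo",
   "so",
   "dll",
   "exe",
   "bin",
   "pkl",
   "model",
   "jpg",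
   "jpeg",
   "png",
   "gif",
   "ico",
   "svg",
   "pdf",
   "doc",
   "docx",
   "xls",
   "xlsx",
   "zip",
   "tar",
   "gz",
   "rar",
   "7z",
   "mp3",
   "mp4",
   "wav",
   "avi",
   "mov",
   "woff",
   "woff2",
   "ttf",
   "eot"] := by decide

-- B returns true on every member of EXCLUDE_FILES
theorem pvAltTrueOnPatterns :
    ∀ p ∈ (pvExcludeFiles : List String), should_exclude_file_alt p = true := by
  decide

theorem pvStartswithEmpty (name : String) : PySem.Str.startswith name "" = true := by
  simp [PySem.Chars.startswith]

theorem pvBeqStr (a b : String) : (a == b) = decide (a = b) := by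
  by_cases h : a = b <;> simp [h]


theorem pvStepA_0 (name : String) : pvStepA name ".DS_Store" = false := by
  unfold pvStepA
  rw [show PySem.Str.isIn "*" ".DS_Store" = false from by decide]
  rfl

theorem pvStepA_1 (name : String) : pvStepA name "Thumbs.db" = false := by
  unfold pvStepA
  rw [show PySem.Str.isIn "*" "Thumbs.db" = false from by decide]
  rfl

theorem pvStepA_2 (name : String) : pvStepA name "*.pyc" = PySem.Str.endswith name ".pyc" := by
  unfold pvStepA
  rw [show PySem.Str.isIn "*" "*.pyc" = true from by decide,
    show PySem.Str.split? "*.pyc" "*" = some ["", ".pyc"] from by decide]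
  show (PySem.Str.startswith name "" && PySem.Str.endswith name ".pyc") = _
  rw [pvStartswithEmpty, Bool.true_and]

theorem pvStepA_3 (name : String) : pvStepA name "*.pyo" = PySem.Str.endswith name ".pyo" := by
  unfold pvStepA
  rw [show PySem.Str.isIn "*" "*.pyo" = true from by decide,
    show PySem.Str.split? "*.pyo" "*" = some ["", ".pyo"] from by decide]
  show (PySem.Str.startswith name "" && PySem.Str.endswith name ".pyo") = _
  rw [pvStartswithEmpty, Bool.true_and]

theorem pvStepA_4 (name : String) : pvStepA name "*.so" = PySem.Str.endswith name ".so" := by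
  unfold pvStepA
  rw [show PySem.Str.isIn "*" "*.so" = true from by decide,
    show PySem.Str.split? "*.so" "*" = some ["", ".so"] from by decide]
  show (PySem.Str.startswith name "" && PySem.Str.endswith name ".so") = _
  rw [pvStartswithEmpty, Bool.true_and]

theorem pvStepA_5 (name : String) : pvStepA name "*.dll" = PySem.Str.endswith name ".dll" := by
  unfold pvStepA
  rw [show PySem.Str.isIn "*" "*.dll" = true from by decide,
    show PySem.Str.split? "*.dll" "*" = some ["", ".dll"] from by decide]
  show (PySem.Str.startswith name "" && PySem.Str.endswith name ".dll") = _
  rw [pvStartswithEmpty, Bool.true_and]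

theorem pvStepA_6 (name : String) : pvStepA name "*.exe" = PySem.Str.endswith name ".exe" := by
  unfold pvStepA
  rw [show PySem.Str.isIn "*" "*.exe" = true from by decide,
    show PySem.Str.split? "*.exe" "*" = some ["", ".exe"] from by decide]
  show (PySem.Str.startswith name "" && PySem.Str.endswith name ".exe") = _
  rw [pvStartswithEmpty, Bool.true_and]

theorem pvStepA_7 (name : String) : pvStepA name "*.bin" = PySem.Str.endswith name ".bin" := by
  unfold pvStepA
  rw [show PySem.Str.isIn "*" "*.bin" = true from by decide,
    show PySem.Str.split? "*.bin" "*" = some ["", ".bin"] from by decide]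
  show (PySem.Str.startswith name "" && PySem.Str.endswith name ".bin") = _
  rw [pvStartswithEmpty, Bool.true_and]

theorem pvStepA_8 (name : String) : pvStepA name "*.pkl" = PySem.Str.endswith name ".pkl" := by
  unfold pvStepA
  rw [show PySem.Str.isIn "*" "*.pkl" = true from by decide,
    show PySem.Str.split? "*.pkl" "*" = some ["", ".pkl"] from by decide]
  show (PySem.Str.startswith name "" && PySem.Str.endswith name ".pkl") = _
  rw [pvStartswithEmpty, Bool.true_and]

theorem pvStepA_9 (name : String) : pvStepA name "*.model" = PySem.Str.endswith name ".model" := by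
  unfold pvStepA
  rw [show PySem.Str.isIn "*" "*.model" = true from by decide,
    show PySem.Str.split? "*.model" "*" = some ["", ".model"] from by decide]
  show (PySem.Str.startswith name "" && PySem.Str.endswith name ".model") = _
  rw [pvStartswithEmpty, Bool.true_and]

theorem pvStepA_10 (name : String) : pvStepA name "*.jpg" = PySem.Str.endswith name ".jpg" := by
  unfold pvStepA
  rw [show PySem.Str.isIn "*" "*.jpg" = true from by decide,
    show PySem.Str.split? "*.jpg" "*" = some ["", ".jpg"] from by decide]
  show (PySem.Str.startswith name "" && PySem.Str.endswith name ".jpg") = _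
  rw [pvStartswithEmpty, Bool.true_and]

theorem pvStepA_11 (name : String) : pvStepA name "*.jpeg" = PySem.Str.endswith name ".jpeg" := by
  unfold pvStepA
  rw [show PySem.Str.isIn "*" "*.jpeg" = true from by decide,
    show PySem.Str.split? "*.jpeg" "*" = some ["", ".jpeg"] from by decide]
  show (PySem.Str.startswith name "" && PySem.Str.endswith name ".jpeg") = _
  rw [pvStartswithEmpty, Bool.true_and]

theorem pvStepA_12 (name : String) : pvStepA name "*.png" = PySem.Str.endswith name ".png" := by
  unfold pvStepA
  rw [show PySem.Str.isIn "*" "*.png" = true from by decide,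
    show PySem.Str.split? "*.png" "*" = some ["", ".png"] from by decide]
  show (PySem.Str.startswith name "" && PySem.Str.endswith name ".png") = _
  rw [pvStartswithEmpty, Bool.true_and]

theorem pvStepA_13 (name : String) : pvStepA name "*.gif" = PySem.Str.endswith name ".gif" := by
  unfold pvStepA
  rw [show PySem.Str.isIn "*" "*.gif" = true from by decide,
    show PySem.Str.split? "*.gif" "*" = some ["", ".gif"] from by decide]
  show (PySem.Str.startswith name "" && PySem.Str.endswith name ".gif") = _
  rw [pvStartswithEmpty, Bool.true_and]

theorem pvStepA_14 (name : String) : pvStepA name "*.ico" = PySem.Str.endswith name ".ico" := by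
  unfold pvStepA
  rw [show PySem.Str.isIn "*" "*.ico" = true from by decide,
    show PySem.Str.split? "*.ico" "*" = some ["", ".ico"] from by decide]
  show (PySem.Str.startswith name "" && PySem.Str.endswith name ".ico") = _
  rw [pvStartswithEmpty, Bool.true_and]

theorem pvStepA_15 (name : String) : pvStepA name "*.svg" = PySem.Str.endswith name ".svg" := by
  unfold pvStepA
  rw [show PySem.Str.isIn "*" "*.svg" = true from by decide,
    show PySem.Str.split? "*.svg" "*" = some ["", ".svg"] from by decide]
  show (PySem.Str.startswith name "" && PySem.Str.endswith name ".svg") = _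
  rw [pvStartswithEmpty, Bool.true_and]

theorem pvStepA_16 (name : String) : pvStepA name "*.pdf" = PySem.Str.endswith name ".pdf" := by
  unfold pvStepA
  rw [show PySem.Str.isIn "*" "*.pdf" = true from by decide,
    show PySem.Str.split? "*.pdf" "*" = some ["", ".pdf"] from by decide]
  show (PySem.Str.startswith name "" && PySem.Str.endswith name ".pdf") = _
  rw [pvStartswithEmpty, Bool.true_and]

theorem pvStepA_17 (name : String) : pvStepA name "*.doc" = PySem.Str.endswith name ".doc" := by
  unfold pvStepA
  rw [show PySem.Str.isIn "*" "*.doc" = true from by decide,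
    show PySem.Str.split? "*.doc" "*" = some ["", ".doc"] from by decide]
  show (PySem.Str.startswith name "" && PySem.Str.endswith name ".doc") = _
  rw [pvStartswithEmpty, Bool.true_and]

theorem pvStepA_18 (name : String) : pvStepA name "*.docx" = PySem.Str.endswith name ".docx" := by
  unfold pvStepA
  rw [show PySem.Str.isIn "*" "*.docx" = true from by decide,
    show PySem.Str.split? "*.docx" "*" = some ["", ".docx"] from by decide]
  show (PySem.Str.startswith name "" && PySem.Str.endswith name ".docx") = _
  rw [pvStartswithEmpty, Bool.true_and]

theorem pvStepA_19 (name : String) : pvStepA name "*.xls" = PySem.Str.endswith name ".xls" := by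
  unfold pvStepA
  rw [show PySem.Str.isIn "*" "*.xls" = true from by decide,
    show PySem.Str.split? "*.xls" "*" = some ["", ".xls"] from by decide]
  show (PySem.Str.startswith name "" && PySem.Str.endswith name ".xls") = _
  rw [pvStartswithEmpty, Bool.true_and]

theorem pvStepA_20 (name : String) : pvStepA name "*.xlsx" = PySem.Str.endswith name ".xlsx" := by
  unfold pvStepA
  rw [show PySem.Str.isIn "*" "*.xlsx" = true from by decide,
    show PySem.Str.split? "*.xlsx" "*" = some ["", ".xlsx"] from by decide]
  show (PySem.Str.startswith name "" && PySem.Str.endswith name ".xlsx") = _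
  rw [pvStartswithEmpty, Bool.true_and]

theorem pvStepA_21 (name : String) : pvStepA name "*.zip" = PySem.Str.endswith name ".zip" := by
  unfold pvStepA
  rw [show PySem.Str.isIn "*" "*.zip" = true from by decide,
    show PySem.Str.split? "*.zip" "*" = some ["", ".zip"] from by decide]
  show (PySem.Str.startswith name "" && PySem.Str.endswith name ".zip") = _
  rw [pvStartswithEmpty, Bool.true_and]

theorem pvStepA_22 (name : String) : pvStepA name "*.tar" = PySem.Str.endswith name ".tar" := by
  unfold pvStepA
  rw [show PySem.Str.isIn "*" "*.tar" = true from by decide,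
    show PySem.Str.split? "*.tar" "*" = some ["", ".tar"] from by decide]
  show (PySem.Str.startswith name "" && PySem.Str.endswith name ".tar") = _
  rw [pvStartswithEmpty, Bool.true_and]

theorem pvStepA_23 (name : String) : pvStepA name "*.gz" = PySem.Str.endswith name ".gz" := by
  unfold pvStepA
  rw [show PySem.Str.isIn "*" "*.gz" = true from by decide,
    show PySem.Str.split? "*.gz" "*" = some ["", ".gz"] from by decide]
  show (PySem.Str.startswith name "" && PySem.Str.endswith name ".gz") = _
  rw [pvStartswithEmpty, Bool.true_and]

theorem pvStepA_24 (name : String) : pvStepA name "*.rar" = PySem.Str.endswith name ".rar" := by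
  unfold pvStepA
  rw [show PySem.Str.isIn "*" "*.rar" = true from by decide,
    show PySem.Str.split? "*.rar" "*" = some ["", ".rar"] from by decide]
  show (PySem.Str.startswith name "" && PySem.Str.endswith name ".rar") = _
  rw [pvStartswithEmpty, Bool.true_and]

theorem pvStepA_25 (name : String) : pvStepA name "*.7z" = PySem.Str.endswith name ".7z" := by
  unfold pvStepA
  rw [show PySem.Str.isIn "*" "*.7z" = true from by decide,
    show PySem.Str.split? "*.7z" "*" = some ["", ".7z"] from by decide]
  show (PySem.Str.startswith name "" && PySem.Str.endswith name ".7z") = _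
  rw [pvStartswithEmpty, Bool.true_and]

theorem pvStepA_26 (name : String) : pvStepA name "*.mp3" = PySem.Str.endswith name ".mp3" := by
  unfold pvStepA
  rw [show PySem.Str.isIn "*" "*.mp3" = true from by decide,
    show PySem.Str.split? "*.mp3" "*" = some ["", ".mp3"] from by decide]
  show (PySem.Str.startswith name "" && PySem.Str.endswith name ".mp3") = _
  rw [pvStartswithEmpty, Bool.true_and]

theorem pvStepA_27 (name : String) : pvStepA name "*.mp4" = PySem.Str.endswith name ".mp4" := by
  unfold pvStepA
  rw [show PySem.Str.isIn "*" "*.mp4" = true from by decide,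
    show PySem.Str.split? "*.mp4" "*" = some ["", ".mp4"] from by decide]
  show (PySem.Str.startswith name "" && PySem.Str.endswith name ".mp4") = _
  rw [pvStartswithEmpty, Bool.true_and]

theorem pvStepA_28 (name : String) : pvStepA name "*.wav" = PySem.Str.endswith name ".wav" := by
  unfold pvStepA
  rw [show PySem.Str.isIn "*" "*.wav" = true from by decide,
    show PySem.Str.split? "*.wav" "*" = some ["", ".wav"] from by decide]
  show (PySem.Str.startswith name "" && PySem.Str.endswith name ".wav") = _
  rw [pvStartswithEmpty, Bool.true_and]

theorem pvStepA_29 (name : String) : pvStepA name "*.avi" = PySem.Str.endswith name ".avi" := by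
  unfold pvStepA
  rw [show PySem.Str.isIn "*" "*.avi" = true from by decide,
    show PySem.Str.split? "*.avi" "*" = some ["", ".avi"] from by decide]
  show (PySem.Str.startswith name "" && PySem.Str.endswith name ".avi") = _
  rw [pvStartswithEmpty, Bool.true_and]

theorem pvStepA_30 (name : String) : pvStepA name "*.mov" = PySem.Str.endswith name ".mov" := by
  unfold pvStepA
  rw [show PySem.Str.isIn "*" "*.mov" = true from by decide,
    show PySem.Str.split? "*.mov" "*" = some ["", ".mov"] from by decide]
  show (PySem.Str.startswith name "" && PySem.Str.endswith name ".mov") = _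
  rw [pvStartswithEmpty, Bool.true_and]

theorem pvStepA_31 (name : String) : pvStepA name "*.woff" = PySem.Str.endswith name ".woff" := by
  unfold pvStepA
  rw [show PySem.Str.isIn "*" "*.woff" = true from by decide,
    show PySem.Str.split? "*.woff" "*" = some ["", ".woff"] from by decide]
  show (PySem.Str.startswith name "" && PySem.Str.endswith name ".woff") = _
  rw [pvStartswithEmpty, Bool.true_and]

theorem pvStepA_32 (name : String) : pvStepA name "*.woff2" = PySem.Str.endswith name ".woff2" := by
  unfold pvStepA
  rw [show PySem.Str.isIn "*" "*.woff2" = true from by decide,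
    show PySem.Str.split? "*.woff2" "*" = some ["", ".woff2"] from by decide]
  show (PySem.Str.startswith name "" && PySem.Str.endswith name ".woff2") = _
  rw [pvStartswithEmpty, Bool.true_and]

theorem pvStepA_33 (name : String) : pvStepA name "*.ttf" = PySem.Str.endswith name ".ttf" := by
  unfold pvStepA
  rw [show PySem.Str.isIn "*" "*.ttf" = true from by decide,
    show PySem.Str.split? "*.ttf" "*" = some ["", ".ttf"] from by decide]
  show (PySem.Str.startswith name "" && PySem.Str.endswith name ".ttf") = _
  rw [pvStartswithEmpty, Bool.true_and]

theorem pvStepA_34 (name : String) : pvStepA name "*.eot" = PySem.Str.endswith name ".eot" := by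
  unfold pvStepA
  rw [show PySem.Str.isIn "*" "*.eot" = true from by decide,
    show PySem.Str.split? "*.eot" "*" = some ["", ".eot"] from by decide]
  show (PySem.Str.startswith name "" && PySem.Str.endswith name ".eot") = _
  rw [pvStartswithEmpty, Bool.true_and]

theorem pvStepA_35 (name : String) : pvStepA name "PROJECT_SNAPSHOT_*.md" = (PySem.Str.startswith name "PROJECT_SNAPSHOT_" && PySem.Str.endswith name ".md") := by
  unfold pvStepA
  rw [show PySem.Str.isIn "*" "PROJECT_SNAPSHOT_*.md" = true from by decide,
    show PySem.Str.split? "PROJECT_SNAPSHOT_*.md" "*" = some ["PROJECT_SNAPSHOT_", ".md"] from by decide]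
  rfl

theorem pvStepA_36 (name : String) : pvStepA name "PROJECT_FULL_*.md" = (PySem.Str.startswith name "PROJECT_FULL_" && PySem.Str.endswith name ".md") := by
  unfold pvStepA
  rw [show PySem.Str.isIn "*" "PROJECT_FULL_*.md" = true from by decide,
    show PySem.Str.split? "PROJECT_FULL_*.md" "*" = some ["PROJECT_FULL_", ".md"] from by decide]
  rfl

theorem pvStepA_37 (name : String) : pvStepA name "PIPELINE_*.md" = (PySem.Str.startswith name "PIPELINE_" && PySem.Str.endswith name ".md") := by
  unfold pvStepA
  rw [show PySem.Str.isIn "*" "PIPELINE_*.md" = true from by decide,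
    show PySem.Str.split? "PIPELINE_*.md" "*" = some ["PIPELINE_", ".md"] from by decide]
  rfl

theorem pvStepA_38 (name : String) : pvStepA name "collect_project_full.py" = false := by
  unfold pvStepA
  rw [show PySem.Str.isIn "*" "collect_project_full.py" = false from by decide]
  rfl

theorem pvStepA_39 (name : String) : pvStepA name "collect_pipeline.py" = false := by
  unfold pvStepA
  rw [show PySem.Str.isIn "*" "collect_pipeline.py" = false from by decide]
  rfl


-- ---- character-level machinery: rfind('.') and endswith through the last dot ----

theorem pvTakeWhileAppend (p : Char → Bool) (t r : List Char) (x : Char)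
    (h : ∀ c ∈ t, p c = true) (hx : p x = false) :
    (t ++ x :: r).takeWhile p = t := by
  induction t with
  | nil => simp [hx]
  | cons a t ih =>
      simp only [List.cons_append, List.takeWhile_cons, h a (by simp)]
      simp [ih (fun c hc => h c (by simp [hc]))]

theorem pvSplitDot (l : List Char) (h : '.' ∈ l) :
    ∃ t r, l = t ++ '.' :: r ∧ '.' ∉ t := by
  induction l with
  | nil => cases h
  | cons a l ih =>
      by_cases ha : a = '.'
      · exact ⟨[], l, by simp [ha], by simp⟩
      · have h' : '.' ∈ l := by
          rcases List.mem_cons.mp h with h1 | h1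
          · exact absurd h1.symm ha
          · exact h1
        obtain ⟨t, r, hl, ht⟩ := ih h'
        refine ⟨a :: t, r, by simp [hl], ?_⟩
        simp only [List.mem_cons, not_or]
        exact ⟨fun hh => ha hh.symm, ht⟩

theorem pvGoNone (l : List Char) (n : Nat)
    (hno : ∀ j, j ≤ n → ¬ (['.'] <+: l.drop j)) :
    PySem.Chars.rfind.go l ['.'] n = -1 := by
  induction n with
  | zero =>
      rw [PySem.Chars.rfind.go]
      rw [if_neg]
      intro hp
      exact hno 0 (by omega) (by simpa using (List.isPrefixOf_iff_prefix).mp hp)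
  | succ j ih =>
      rw [PySem.Chars.rfind.go]
      rw [if_neg]
      · exact ih (fun i hi => hno i (by omega))
      · intro hp
        exact hno (j + 1) (by omega) ((List.isPrefixOf_iff_prefix).mp hp)

theorem pvGoFound (l : List Char) (n k : Nat) (hk : k ≤ n)
    (hpre : ['.'] <+: l.drop k)
    (hno : ∀ j, k < j → ¬ (['.'] <+: l.drop j)) :
    PySem.Chars.rfind.go l ['.'] n = (k : Int) := by
  induction n with
  | zero =>
      have hk0 : k = 0 := by omega
      subst hk0
      rw [PySem.Chars.rfind.go]
      rw [if_pos ((List.isPrefixOf_iff_prefix).mpr (by simpa using hpre))]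
      simp
  | succ j ih =>
      rw [PySem.Chars.rfind.go]
      by_cases hkj : k = j + 1
      · subst hkj
        rw [if_pos ((List.isPrefixOf_iff_prefix).mpr hpre)]
      · rw [if_neg]
        · exact ih (by omega)
        · intro hp
          exact hno (j + 1) (by omega) ((List.isPrefixOf_iff_prefix).mp hp)

theorem pvRfindSpec (l t r : List Char) (h : l.reverse = t ++ '.' :: r) (ht : '.' ∉ t) :
    PySem.Chars.rfind l ['.'] = (r.length : Int) ∧ l.drop (r.length + 1) = t.reverse := by
  have hl : l = r.reverse ++ '.' :: t.reverse := by
    conv_lhs => rw [← List.reverse_reverse l]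
    rw [h]
    simp
  have hdropk : l.drop r.length = '.' :: t.reverse := by
    rw [hl, ← List.length_reverse (as := r), List.drop_left]
  have hdrop : l.drop (r.length + 1) = t.reverse := by
    have h1 : l.drop (r.length + 1) = (l.drop r.length).drop 1 := by
      rw [List.drop_drop, Nat.add_comm]
    rw [h1, hdropk, List.drop_one, List.tail_cons]
  have hpk : ['.'] <+: l.drop r.length := by
    rw [hdropk]; exact ⟨t.reverse, rfl⟩
  have hno : ∀ j, r.length < j → ¬ (['.'] <+: l.drop j) := by
    intro j hj hp
    have hmem : '.' ∈ l.drop j := hp.subset (by simp)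
    have h2 : l.drop j = (l.drop (r.length + 1)).drop (j - r.length - 1) := by
      rw [List.drop_drop]
      congr 1
      omega
    rw [h2, hdrop] at hmem
    exact ht (by simpa using List.mem_of_mem_drop hmem)
  have hlen : r.length ≤ l.length := by
    have := congrArg List.length hl
    simp at this
    omega
  refine ⟨?_, hdrop⟩
  unfold PySem.Chars.rfind
  exact pvGoFound l l.length r.length hlen hpk hno

theorem pvRfindNoDot (l : List Char) (hl : '.' ∉ l) : PySem.Chars.rfind l ['.'] = -1 := by
  unfold PySem.Chars.rfind
  apply pvGoNone
  intro j _ hp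
  exact hl (List.mem_of_mem_drop (hp.subset (by simp)))

theorem pvEndsNoDot (l pe : List Char) (hl : '.' ∉ l) :
    PySem.Chars.endswith l ('.' :: pe) = false := by
  by_contra hc
  have hsf : ('.' :: pe).isSuffixOf l = true := by
    simpa [PySem.Chars.endswith] using hc
  have hs : ('.' :: pe) <:+ l := (List.isSuffixOf_iff_suffix).mp hsf
  exact hl (hs.subset (by simp))

theorem pvEndsChar (l t r pe : List Char) (h : l.reverse = t ++ '.' :: r)
    (ht : '.' ∉ t) (hpe : '.' ∉ pe) :
    (PySem.Chars.endswith l ('.' :: pe) = true) ↔ t = pe.reverse := by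
  have hbP : ∀ (c : Char), c ∈ t → (c != '.') = true := by
    intro c hc
    simp only [bne_iff_ne, ne_eq]
    intro hcd; exact ht (hcd ▸ hc)
  have hbpe : ∀ (c : Char), c ∈ pe.reverse → (c != '.') = true := by
    intro c hc
    simp only [bne_iff_ne, ne_eq]
    intro hcd
    exact hpe (List.mem_reverse.mp (hcd ▸ hc))
  have hdotF : (('.' : Char) != '.') = false := by decide
  constructor
  · intro hsw
    have hsf : ('.' :: pe) <:+ l :=
      (List.isSuffixOf_iff_suffix).mp (by simpa [PySem.Chars.endswith] using hsw)
    have hpre : (pe.reverse ++ ['.']) <+: l.reverse := by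
      have h2 := (List.reverse_prefix (l₁ := '.' :: pe) (l₂ := l)).mpr hsf
      simpa using h2
    obtain ⟨u, hu⟩ := hpre
    rw [h] at hu
    have hu2 : pe.reverse ++ '.' :: u = t ++ '.' :: r := by
      simpa [List.append_assoc] using hu
    have e1 : ((pe.reverse ++ '.' :: u).takeWhile (· != '.')) = pe.reverse :=
      pvTakeWhileAppend _ _ _ _ hbpe hdotF
    have e2 : ((t ++ '.' :: r).takeWhile (· != '.')) = t :=
      pvTakeWhileAppend _ _ _ _ hbP hdotF
    rw [hu2, e2] at e1
    exact e1
  · intro hte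
    subst hte
    have hsf : ('.' :: pe) <:+ l := by
      rw [← List.reverse_prefix, h]
      exact ⟨r, by simp⟩
    simp [PySem.Chars.endswith, List.isSuffixOf_iff_suffix, hsf]

theorem pvMemLit (name : String) (h : name ∉ (pvExcludeFiles : List String)) :
    name ∉ (pvExact : List String) := by
  intro hm
  apply h
  rw [pvExcludeFiles_eq]
  rw [show (pvExact : List String) = [".DS_Store", "Thumbs.db",
    "collect_project_full.py", "collect_pipeline.py"] from by decide] at hm
  simp only [List.mem_cons, List.not_mem_nil, or_false] at hm ⊢
  tauto



-- ===== VERDICT (by name: the statement is the Claim_ definition above) =====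
theorem should_exclude_file_spec : Claim_equal_should_exclude_file := by
  intro name _
  unfold Spec_should_exclude_file
  by_cases hmem : name ∈ (pvExcludeFiles : List String)
  · rw [should_exclude_file, if_pos hmem, pvAltTrueOnPatterns name hmem]
  · have hexact : name ∉ (pvExact : List String) := pvMemLit name hmem
    rw [should_exclude_file, if_neg hmem]
    simp only [should_exclude_file_alt]
    rw [if_neg hexact]
    by_cases hdot : '.' ∈ name.toList
    · -- name contains a dot: both sides reduce to tests of the part after the last dot
      obtain ⟨t, r, h, ht⟩ := pvSplitDot name.toList.reverse (List.mem_reverse.mpr hdot)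
      obtain ⟨hr, hdrop⟩ := pvRfindSpec name.toList t r h ht
      have hrS : PySem.Str.rfind name "." = (r.length : Int) := by
        rw [PySem.Str.rfind_eq, show (".".toList) = ['.'] from by decide, hr]
      rw [hrS]
      rw [if_neg (by omega : ¬ ((r.length : Int) < 0))]
      set E := PySem.Str.slice name (some ((r.length : Int) + 1)) none with hEdef
      have hext : E.toList = t.reverse := by
        rw [hEdef, PySem.Str.toList_slice, PySem.Chars.slice_eq_listSlice,
          show ((r.length : Int) + 1) = ((r.length + 1 : Nat) : Int) from by push_cast; ring,
          PySem.List.slice_from_natCast, hdrop]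
      have hkey : ∀ (p e : String), p.toList = '.' :: e.toList → '.' ∉ e.toList →
          PySem.Str.endswith name p = decide (E = e) := by
        intro p e hp hpe
        rw [PySem.Str.endswith_eq, hp, Bool.eq_iff_iff, decide_eq_true_eq,
          pvEndsChar name.toList t r e.toList h ht hpe]
        constructor
        · intro hteq
          apply String.toList_inj.mp
          rw [hext, hteq, List.reverse_reverse]
        · intro hEe
          have h2 : E.toList = e.toList := by rw [hEe]
          rw [hext] at h2
          rw [← h2, List.reverse_reverse]
      rw [pvExcludeFiles_eq]
      simp only [List.any_cons, List.any_nil, pvStepA_0, pvStepA_1, pvStepA_2, pvStepA_3, pvStepA_4, pvStepA_5, pvStepA_6, pvStepA_7, pvStepA_8, pvStepA_9, pvStepA_10, pvStepA_11, pvStepA_12, pvStepA_13, pvStepA_14, pvStepA_15, pvStepA_16, pvStepA_17, pvStepA_18, pvStepA_19, pvStepA_20, pvStepA_21, pvStepA_22, pvStepA_23, pvStepA_24, pvStepA_25, pvStepA_26, pvStepA_27, pvStepA_28, pvStepA_29, pvStepA_30, pvStepA_31, pvStepA_32, pvStepA_33, pvStepA_34, pvStepA_35, pvStepA_36, pvStepA_37,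 pvStepA_38, pvStepA_39, Bool.or_false, Bool.false_or]
      rw [hkey ".pyc" "pyc" (by decide) (by decide),
        hkey ".pyo" "pyo" (by decide) (by decide),
        hkey ".so" "so" (by decide) (by decide),
        hkey ".dll" "dll" (by decide) (by decide),
        hkey ".exe" "exe" (by decide) (by decide),
        hkey ".bin" "bin" (by decide) (by decide),
        hkey ".pkl" "pkl" (by decide) (by decide),
        hkey ".model" "model" (by decide) (by decide),
        hkey ".jpg" "jpg" (by decide) (by decide),
        hkey ".jpeg" "jpeg" (by decide) (by decide),
        hkey ".png" "png" (by decide) (by decide),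
        hkey ".gif" "gif" (by decide) (by decide),
        hkey ".ico" "ico" (by decide) (by decide),
        hkey ".svg" "svg" (by decide) (by decide),
        hkey ".pdf" "pdf" (by decide) (by decide),
        hkey ".doc" "doc" (by decide) (by decide),
        hkey ".docx" "docx" (by decide) (by decide),
        hkey ".xls" "xls" (by decide) (by decide),
        hkey ".xlsx" "xlsx" (by decide) (by decide),
        hkey ".zip" "zip" (by decide) (by decide),
        hkey ".tar" "tar" (by decide) (by decide),
        hkey ".gz" "gz" (by decide) (by decide),
        hkey ".rar" "rar" (by decide) (by decide),
        hkey ".7z" "7z" (by decide) (by decide),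
        hkey ".mp3" "mp3" (by decide) (by decide),
        hkey ".mp4" "mp4" (by decide) (by decide),
        hkey ".wav" "wav" (by decide) (by decide),
        hkey ".avi" "avi" (by decide) (by decide),
        hkey ".mov" "mov" (by decide) (by decide),
        hkey ".woff" "woff" (by decide) (by decide),
        hkey ".woff2" "woff2" (by decide) (by decide),
        hkey ".ttf" "ttf" (by decide) (by decide),
        hkey ".eot" "eot" (by decide) (by decide),
        hkey ".md" "md" (by decide) (by decide)]
      rw [pvBeqStr E "md"]
      by_cases hm : E ∈ (pvExts : List String)
      · rw [if_pos hm]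
        rw [pvExts_eq] at hm
        simp only [List.mem_cons, List.not_mem_nil, or_false] at hm
        rcases hm with h|h|h|h|h|h|h|h|h|h|h|h|h|h|h|h|h|h|h|h|h|h|h|h|h|h|h|h|h|h|h|h|h <;> simp [h]
      · rw [if_neg hm]
        rw [pvExts_eq] at hm
        simp only [List.mem_cons, List.not_mem_nil, or_false, not_or] at hm
        obtain ⟨h1, h2, h3, h4, h5, h6, h7, h8, h9, h10, h11, h12, h13, h14, h15, h16, h17, h18, h19, h20, h21, h22, h23, h24, h25, h26, h27, h28, h29, h30, h31, h32, h33⟩ := hm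
        simp only [pvMdPrefixes, List.any_cons, List.any_nil, Bool.or_false]
        simp [h1, h2, h3, h4, h5, h6, h7, h8, h9, h10, h11, h12, h13, h14, h15, h16, h17, h18, h19, h20, h21, h22, h23, h24, h25, h26, h27, h28, h29, h30, h31, h32, h33]
        cases hdm : decide (E = "md") <;> simp
    · -- no dot: A's every suffix test fails and B's rfind is -1
      have hkey0 : ∀ (p : String) (pe : List Char), p.toList = '.' :: pe →
          PySem.Str.endswith name p = false := by
        intro p pe hp
        rw [PySem.Str.endswith_eq, hp]
        exact pvEndsNoDot name.toList pe hdot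
      have hrS : PySem.Str.rfind name "." = -1 := by
        rw [PySem.Str.rfind_eq, show (".".toList) = ['.'] from by decide]
        exact pvRfindNoDot name.toList hdot
      rw [hrS]
      rw [if_pos (by decide : (-1 : Int) < 0)]
      rw [pvExcludeFiles_eq]
      simp only [List.any_cons, List.any_nil, pvStepA_0, pvStepA_1, pvStepA_2, pvStepA_3, pvStepA_4, pvStepA_5, pvStepA_6, pvStepA_7, pvStepA_8, pvStepA_9, pvStepA_10, pvStepA_11, pvStepA_12, pvStepA_13, pvStepA_14, pvStepA_15, pvStepA_16, pvStepA_17, pvStepA_18, pvStepA_19, pvStepA_20, pvStepA_21, pvStepA_22, pvStepA_23, pvStepA_24, pvStepA_25, pvStepA_26, pvStepA_27, pvStepA_28, pvStepA_29, pvStepA_30, pvStepA_31, pvStepA_32, pvStepA_33, pvStepA_34, pvStepA_35, pvStepA_36, pvStepA_37, pvStepA_38, pvStepA_39, Bool.or_false, Bool.false_or]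
      rw [hkey0 ".pyc" ("pyc".toList) (by decide),
        hkey0 ".pyo" ("pyo".toList) (by decide),
        hkey0 ".so" ("so".toList) (by decide),
        hkey0 ".dll" ("dll".toList) (by decide),
        hkey0 ".exe" ("exe".toList) (by decide),
        hkey0 ".bin" ("bin".toList) (by decide),
        hkey0 ".pkl" ("pkl".toList) (by decide),
        hkey0 ".model" ("model".toList) (by decide),
        hkey0 ".jpg" ("jpg".toList) (by decide),
        hkey0 ".jpeg" ("jpeg".toList) (by decide),
        hkey0 ".png" ("png".toList) (by decide),
        hkey0 ".gif" ("gif".toList) (by decide),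
        hkey0 ".ico" ("ico".toList) (by decide),
        hkey0 ".svg" ("svg".toList) (by decide),
        hkey0 ".pdf" ("pdf".toList) (by decide),
        hkey0 ".doc" ("doc".toList) (by decide),
        hkey0 ".docx" ("docx".toList) (by decide),
        hkey0 ".xls" ("xls".toList) (by decide),
        hkey0 ".xlsx" ("xlsx".toList) (by decide),
        hkey0 ".zip" ("zip".toList) (by decide),
        hkey0 ".tar" ("tar".toList) (by decide),
        hkey0 ".gz" ("gz".toList) (by decide),
        hkey0 ".rar" ("rar".toList) (by decide),
        hkey0 ".7z" ("7z".toList) (by decide),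
        hkey0 ".mp3" ("mp3".toList) (by decide),
        hkey0 ".mp4" ("mp4".toList) (by decide),
        hkey0 ".wav" ("wav".toList) (by decide),
        hkey0 ".avi" ("avi".toList) (by decide),
        hkey0 ".mov" ("mov".toList) (by decide),
        hkey0 ".woff" ("woff".toList) (by decide),
        hkey0 ".woff2" ("woff2".toList) (by decide),
        hkey0 ".ttf" ("ttf".toList) (by decide),
        hkey0 ".eot" ("eot".toList) (by decide),
        hkey0 ".md" ("md".toList) (by decide)]
      simp
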